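-- pv_equiv track=rewrite | github.com/Gerno666/Computer_Vision-Project | staff_detection.py | longest_monotonic_subsequence
-- ===== SOURCE A (Python) =====
-- def longest_monotonic_subsequence(sequence, increasing):
--     n = len(sequence)
--     dp = [1] * n
--
--     for i in range(1, n):
--         for j in range(0, i):
--             if increasing:
--                 if sequence[i] >= sequence[j] and dp[i] < dp[j] + 1:
--                     dp[i] = dp[j] + 1
--             else:
--                 if sequence[i] <= sequence[j] and dp[i] < dp[j] + 1:
--                     dp[i] = dp[j] + 1
--
--     max_length = max(dp)
--     last_index = dp.index(max_length)
--     longest_subsequence = [sequence[last_index]]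
--
--     for i in range(last_index - 1, -1, -1):
--         if increasing:
--             if sequence[i] <= longest_subsequence[-1] and dp[i] == max_length - 1:
--                 longest_subsequence.insert(0, sequence[i])
--                 max_length -= 1
--         else:
--             if sequence[i] >= longest_subsequence[-1] and dp[i] == max_length - 1:
--                 longest_subsequence.insert(0, sequence[i])
--                 max_length -= 1
--
--     return longest_subsequence
-- ===== SOURCE B (Python) =====
-- def _bisect_right(a, x):
--     # CPython's bisect_right, written out (A imports nothing, so no bisect import)
--     lo, hi = 0, len(a)
--     while lo < hi:
--         mid = (lo + hi) // 2
--         if x < a[mid]: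
--             hi = mid
--         else:
--             lo = mid + 1
--     return lo
--
--
-- def longest_monotonic_subsequence(sequence, increasing):
--     # Patience sorting: dp[i] (length of the longest monotone run ending at i) via
--     # binary search on the list of minimal tail values, O(n log n) instead of O(n^2).
--     vals = list(sequence) if increasing else [-x for x in sequence]
--     tails = []
--     dp = []
--     for x in vals:
--         d = _bisect_right(tails, x) + 1
--         dp.append(d)
--         if d - 1 < len(tails):
--             tails[d - 1] = x
--         else:
--             tails.append(x)
--     m = max(dp)
--     k = dp.index(m)
--     last = sequence[k]
--     out = [last]
--     need = m - 1
--     for i in range(k - 1, -1, -1):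
--         if dp[i] == need and (sequence[i] <= last if increasing else sequence[i] >= last):
--             out.append(sequence[i])
--             need -= 1
--     out.reverse()
--     return out
-- ===== Notes on version B (the rewrite author's own statement) =====
-- stated objective: faster
-- what changed: Replaces the O(n^2) nested-loop DP with patience sorting: dp[i] is obtained by binary search (bisect_right) on the maintained list of minimal tail values, keeping A's exact backward reconstruction rule; the decreasing case is reduced to the increasing one by negation.
import Mathlib
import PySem

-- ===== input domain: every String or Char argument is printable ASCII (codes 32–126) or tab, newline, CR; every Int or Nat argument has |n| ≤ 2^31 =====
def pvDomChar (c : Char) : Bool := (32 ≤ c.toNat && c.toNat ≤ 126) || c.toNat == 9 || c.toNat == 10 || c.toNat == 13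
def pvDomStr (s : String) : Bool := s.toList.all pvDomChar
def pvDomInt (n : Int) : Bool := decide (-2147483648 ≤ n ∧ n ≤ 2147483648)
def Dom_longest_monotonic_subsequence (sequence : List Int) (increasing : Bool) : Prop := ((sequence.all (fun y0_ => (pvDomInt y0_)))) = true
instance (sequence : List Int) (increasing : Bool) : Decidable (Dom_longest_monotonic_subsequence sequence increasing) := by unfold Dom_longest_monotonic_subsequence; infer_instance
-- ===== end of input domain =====

-- B replaces A's O(n^2) nested-loop DP by patience sorting (binary search on the list of
-- minimal tail values) with the same backward reconstruction; objective: faster.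

-- ===== PORT A =====
def longest_monotonic_subsequence (sequence : List Int) (increasing : Bool) : List Int :=
  let n : Int := (sequence.length : Int)
  let dp0 : List Int := List.replicate sequence.length 1
  let dp := (PySem.List.pyRange 1 n).foldl (fun dp i =>
    (PySem.List.pyRange 0 i).foldl (fun dp j =>
      if increasing then
        if PySem.List.pyGetD sequence i 0 ≥ PySem.List.pyGetD sequence j 0 ∧
           PySem.List.pyGetD dp i 0 < PySem.List.pyGetD dp j 0 + 1 then
          PySem.List.pySetD dp i (PySem.List.pyGetD dp j 0 + 1)
        else dp
      else
        if PySem.List.pyGetD sequence i 0 ≤ PySem.List.pyGetD sequence j 0 ∧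
           PySem.List.pyGetD dp i 0 < PySem.List.pyGetD dp j 0 + 1 then
          PySem.List.pySetD dp i (PySem.List.pyGetD dp j 0 + 1)
        else dp) dp) dp0
  match PySem.List.max? dp (fun y => y) with
  | none => []        -- n = 0: Python raises ValueError on max([]) here; Pre_ excludes []
  | some maxLength =>
    let lastIndex : Int := (((PySem.List.index? dp maxLength).getD 0 : Nat) : Int)
    let start : List Int := [PySem.List.pyGetD sequence lastIndex 0]
    let res := (PySem.List.pyRange (lastIndex - 1) (-1) (-1)).foldl
      (fun (st : List Int × Int) i =>
        if increasing then
          if PySem.List.pyGetD sequence i 0 ≤ PySem.List.pyGetD st.1 (-1) 0 ∧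
             PySem.List.pyGetD dp i 0 = st.2 - 1 then
            (PySem.List.pyGetD sequence i 0 :: st.1, st.2 - 1)
          else st
        else
          if PySem.List.pyGetD sequence i 0 ≥ PySem.List.pyGetD st.1 (-1) 0 ∧
             PySem.List.pyGetD dp i 0 = st.2 - 1 then
            (PySem.List.pyGetD sequence i 0 :: st.1, st.2 - 1)
          else st)
      (start, maxLength)
    res.1

-- ===== PORT B =====
-- Source B's hand-written _bisect_right is CPython's bisect_right loop (mid = (lo+hi)//2;
-- x < a[mid] → hi := mid, else lo := mid+1), which is exactly the prelude primitive's
-- binary-search loop, so it is ported as PySem.List.bisectRight (exact, step for step).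
def lms_bisect_right (a : List Int) (x : Int) : Nat := PySem.List.bisectRight a x

def longest_monotonic_subsequence_alt (sequence : List Int) (increasing : Bool) : List Int :=
  let vals := if increasing then sequence else sequence.map (fun y => -y)
  let st := vals.foldl (fun (st : List Int × List Int) x =>
      let d : Int := ((lms_bisect_right st.1 x : Nat) : Int) + 1
      let dp := st.2 ++ [d]
      let tails := if d - 1 < (st.1.length : Int) then PySem.List.pySetD st.1 (d - 1) x
                   else st.1 ++ [x]
      (tails, dp)) ([], [])
  let dp := st.2
  match PySem.List.max? dp (fun y => y) with
  | none => []        -- empty input: Python's max([]) raises; Pre_ excludes []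
  | some m =>
    let k : Int := (((PySem.List.index? dp m).getD 0 : Nat) : Int)
    let last := PySem.List.pyGetD sequence k 0
    let res := (PySem.List.pyRange (k - 1) (-1) (-1)).foldl
      (fun (st : List Int × Int) i =>
        if PySem.List.pyGetD dp i 0 = st.2 ∧
           (if increasing then PySem.List.pyGetD sequence i 0 ≤ last
            else PySem.List.pyGetD sequence i 0 ≥ last) then
          (st.1 ++ [PySem.List.pyGetD sequence i 0], st.2 - 1)
        else st)
      ([last], m - 1)
    res.1.reverse

-- ===== PRECONDITION & SPEC =====
-- Pre_ excludes only the empty list, on which A raises ValueError (max of an empty list).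
def Pre_longest_monotonic_subsequence (sequence : List Int) (increasing : Bool) : Prop :=
  sequence ≠ []
instance (sequence : List Int) (increasing : Bool) : Decidable (Pre_longest_monotonic_subsequence sequence increasing) := by unfold Pre_longest_monotonic_subsequence; infer_instance

def pvWitness_longest_monotonic_subsequence : List Int × Bool := ([2, 1, 3, 3], true)

def Spec_longest_monotonic_subsequence (sequence : List Int) (increasing : Bool) (out : List Int) : Prop := out = longest_monotonic_subsequence_alt sequence increasing
instance (sequence : List Int) (increasing : Bool) (out : List Int) : Decidable (Spec_longest_monotonic_subsequence sequence increasing out) := by unfold Spec_longest_monotonic_subsequence; infer_instance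

-- ===== CLAIM (what is proved, stated in full; the proofs are below) =====
def Claim_equal_longest_monotonic_subsequence : Prop := ∀ (sequence : List Int) (increasing : Bool), Dom_longest_monotonic_subsequence sequence increasing → Pre_longest_monotonic_subsequence sequence increasing → Spec_longest_monotonic_subsequence sequence increasing (longest_monotonic_subsequence sequence increasing)

-- ===== LEMMAS AND PROOFS =====

-- Canonical description of the DP both programs compute: lmsPairs vals is the list of
-- (value, dp) pairs with dp(i) = 1 + max{dp(j) | j < i, vals(j) ≤ vals(i)} (0 if none).
def lmsM (acc : List (Int × Int)) (x : Int) : Int :=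
  acc.foldl (fun b p => if p.1 ≤ x then max b p.2 else b) 0

def lmsStep (acc : List (Int × Int)) (x : Int) : List (Int × Int) :=
  acc ++ [(x, 1 + lmsM acc x)]

def lmsPairs (vals : List Int) : List (Int × Int) := vals.foldl lmsStep []

def lmsDp (vals : List Int) : List Int := (lmsPairs vals).map (·.2)

theorem lmsFold_fst (vals : List Int) : ∀ acc : List (Int × Int),
    (vals.foldl lmsStep acc).map (·.1) = acc.map (·.1) ++ vals := by
  induction vals with
  | nil => intro acc; simp
  | cons x t ih =>
    intro acc
    simp only [List.foldl_cons, ih, lmsStep]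
    simp

theorem lmsPairs_fst (vals : List Int) : (lmsPairs vals).map (·.1) = vals := by
  simpa [lmsPairs] using lmsFold_fst vals []

theorem length_lmsPairs (vals : List Int) : (lmsPairs vals).length = vals.length := by
  have := congrArg List.length (lmsPairs_fst vals)
  simpa using this

theorem lmsPairs_getElem_fst (vals : List Int) (k : Nat) (hk : k < (lmsPairs vals).length) :
    (lmsPairs vals)[k].1 = vals[k]'(by rw [← length_lmsPairs vals]; exact hk) := by
  calc (lmsPairs vals)[k].1
      = ((lmsPairs vals).map (·.1))[k]'(by simpa using hk) := by simp
    _ = _ := List.getElem_of_eq (lmsPairs_fst vals) _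

theorem lmsM_append (acc : List (Int × Int)) (x d y : Int) :
    lmsM (acc ++ [(x, d)]) y = if x ≤ y then max (lmsM acc y) d else lmsM acc y := by
  simp [lmsM, List.foldl_append]

-- ---- B-side: the patience loop maintains a sorted tails list whose bisect position
-- ---- at any y counts exactly the best dp among processed pairs with value ≤ y ----

theorem bisectRight_eq_of (xs : List Int) (y : Int) (m : Nat)
    (hs : List.Pairwise (fun a b => a ≤ b) xs) (hm : m ≤ xs.length)
    (h1 : ∀ (j : Nat) (hj : j < xs.length), j < m → xs[j] ≤ y)
    (h2 : ∀ (j : Nat) (hj : j < xs.length), m ≤ j → y < xs[j]) :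
    PySem.List.bisectRight xs y = m := by
  obtain ⟨hb, hb1, hb2⟩ := PySem.List.bisectRight_spec xs y hs
  set r := PySem.List.bisectRight xs y with hr
  by_contra hne
  rcases Nat.lt_or_ge r m with h | h
  · have hrlen : r < xs.length := lt_of_lt_of_le h hm
    have := h1 r hrlen h
    have := hb2 r hrlen (le_refl r)
    omega
  · have hmlen : m < xs.length := lt_of_lt_of_le (Nat.lt_of_le_of_ne h (fun e => hne e.symm)) hb
    have := hb1 m hmlen (Nat.lt_of_le_of_ne h (fun e => hne e.symm))
    have := h2 m hmlen (le_refl m)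
    omega

theorem sorted_set_at (tails : List Int) (x : Int) (r : Nat)
    (hs : List.Pairwise (fun a b => a ≤ b) tails)
    (hx1 : ∀ (j : Nat) (hj : j < tails.length), j < r → tails[j] ≤ x)
    (hx2 : ∀ (j : Nat) (hj : j < tails.length), r ≤ j → x < tails[j]) :
    List.Pairwise (fun a b => a ≤ b) (tails.set r x) := by
  rw [List.pairwise_iff_getElem] at hs ⊢
  intro i j hi hj hij
  simp only [List.length_set] at hi hj
  simp only [List.getElem_set]
  split_ifs with h1 h2 h2
  · omega
  · exact le_of_lt (hx2 j hj (by omega))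
  · exact hx1 i hi (by omega)
  · exact hs i j hi hj hij

theorem sorted_append_top (tails : List Int) (x : Int)
    (hs : List.Pairwise (fun a b => a ≤ b) tails)
    (hx1 : ∀ (j : Nat) (hj : j < tails.length), j < tails.length → tails[j] ≤ x) :
    List.Pairwise (fun a b => a ≤ b) (tails ++ [x]) := by
  rw [List.pairwise_iff_getElem] at hs ⊢
  intro i j hi hj hij
  simp only [List.length_append, List.length_cons, List.length_nil] at hi hj
  rcases Nat.lt_or_ge j tails.length with hjl | hjl
  · rw [List.getElem_append_left (by omega), List.getElem_append_left hjl]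
    exact hs i j (by omega) hjl hij
  · have hjeq : j = tails.length := by omega
    rw [List.getElem_append_left (by omega)]
    subst hjeq
    rw [List.getElem_append_right (by omega)]
    simpa using hx1 i (by omega) (by omega)

def patInv (pairs : List (Int × Int)) (tails : List Int) : Prop :=
  List.Pairwise (fun a b => a ≤ b) tails ∧
  ∀ y : Int, (PySem.List.bisectRight tails y : Int) = lmsM pairs y

theorem patInv_step (pairs : List (Int × Int)) (tails : List Int) (x : Int)
    (h : patInv pairs tails) :
    patInv (lmsStep pairs x)
      (if PySem.List.bisectRight tails x < tails.length
       then tails.set (PySem.List.bisectRight tails x) x else tails ++ [x]) := by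
  obtain ⟨hs, hcnt⟩ := h
  obtain ⟨hrle, hx1, hx2⟩ := PySem.List.bisectRight_spec tails x hs
  set r := PySem.List.bisectRight tails x with hrdef
  have hMx : lmsM pairs x = (r : Int) := (hcnt x).symm
  -- the new count, as a Nat statement
  have key : ∀ y : Int,
      PySem.List.bisectRight
        (if r < tails.length then tails.set r x else tails ++ [x]) y
      = (if x ≤ y then max (PySem.List.bisectRight tails y) (r + 1)
         else PySem.List.bisectRight tails y) := by
    intro y
    obtain ⟨hyle, hy1, hy2⟩ := PySem.List.bisectRight_spec tails y hs
    set cy := PySem.List.bisectRight tails y with hcydef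
    by_cases hr : r < tails.length
    · -- set case
      have hs' : List.Pairwise (fun a b => a ≤ b) (tails.set r x) :=
        sorted_set_at tails x r hs (fun j hj hjr => hx1 j hj hjr) (fun j hj hrj => hx2 j hj hrj)
      by_cases hxy : x ≤ y
      · rcases Nat.lt_or_ge r cy with hc | hc
        · -- cy ≥ r+1 : count unchanged
          rw [if_pos hr, if_pos hxy]
          have : max cy (r + 1) = cy := by omega
          rw [this]
          apply bisectRight_eq_of _ _ _ hs' (by simpa using hyle)
          · intro j hj hjcy
            simp only [List.length_set] at hj
            simp only [List.getElem_set]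
            split_ifs with hjr
            · exact hxy
            · exact hy1 j hj hjcy
          · intro j hj hcyj
            simp only [List.length_set] at hj
            simp only [List.getElem_set]
            split_ifs with hjr
            · omega
            · exact hy2 j hj hcyj
        · -- cy ≤ r : count becomes r+1
          rw [if_pos hr, if_pos hxy]
          have : max cy (r + 1) = r + 1 := by omega
          rw [this]
          apply bisectRight_eq_of _ _ _ hs' (by simp; omega)
          · intro j hj hjr1
            simp only [List.length_set] at hj
            simp only [List.getElem_set]
            split_ifs with hjr
            · exact hxy
            · exact le_trans (hx1 j hj (by omega)) hxy
          · intro j hj hr1j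
            simp only [List.length_set] at hj
            simp only [List.getElem_set]
            split_ifs with hjr
            · omega
            · exact hy2 j hj (by omega)
      · -- y < x : count unchanged
        have hcyr : cy ≤ r := by
          by_contra hcc
          have h1 := hy1 r hr (by omega)
          have h2 := hx2 r hr (le_refl r)
          omega
        rw [if_pos hr, if_neg hxy]
        apply bisectRight_eq_of _ _ _ hs' (by simpa using hyle)
        · intro j hj hjcy
          simp only [List.length_set] at hj
          simp only [List.getElem_set]
          split_ifs with hjr
          · omega
          · exact hy1 j hj hjcy
        · intro j hj hcyj
          simp only [List.length_set] at hj
          simp only [List.getElem_set]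
          split_ifs with hjr
          · omega
          · exact hy2 j hj hcyj
    · -- append case: r = tails.length
      have hs' : List.Pairwise (fun a b => a ≤ b) (tails ++ [x]) :=
        sorted_append_top tails x hs (fun j hj _ => hx1 j hj (by omega))
      by_cases hxy : x ≤ y
      · rw [if_neg hr, if_pos hxy]
        have : max cy (r + 1) = r + 1 := by omega
        rw [this]
        apply bisectRight_eq_of _ _ _ hs' (by simp; omega)
        · intro j hj hjr1
          simp only [List.length_append, List.length_cons, List.length_nil] at hj
          rcases Nat.lt_or_ge j tails.length with hjl | hjl
          · rw [List.getElem_append_left hjl]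
            exact le_trans (hx1 j hjl (by omega)) hxy
          · have hjeq : j = tails.length := by omega
            subst hjeq
            rw [List.getElem_append_right (by omega)]
            simpa using hxy
        · intro j hj hr1j
          simp only [List.length_append, List.length_cons, List.length_nil] at hj
          omega
      · rw [if_neg hr, if_neg hxy]
        apply bisectRight_eq_of _ _ _ hs' (by simp; omega)
        · intro j hj hjcy
          simp only [List.length_append, List.length_cons, List.length_nil] at hj
          rw [List.getElem_append_left (by omega)]
          exact hy1 j (by omega) hjcy
        · intro j hj hcyj
          simp only [List.length_append, List.length_cons, List.length_nil] at hj
          rcases Nat.lt_or_ge j tails.length with hjl | hjl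
          · rw [List.getElem_append_left hjl]
            exact hy2 j hjl hcyj
          · have hjeq : j = tails.length := by omega
            subst hjeq
            rw [List.getElem_append_right (by omega)]
            simpa using by omega
  constructor
  · by_cases hr : r < tails.length
    · rw [if_pos hr]
      exact sorted_set_at tails x r hs (fun j hj hjr => hx1 j hj hjr) (fun j hj hrj => hx2 j hj hrj)
    · rw [if_neg hr]
      exact sorted_append_top tails x hs (fun j hj _ => hx1 j hj (by omega))
  · intro y
    rw [key y]
    simp only [lmsStep, lmsM_append, ← hcnt y, hMx]
    by_cases hxy : x ≤ y
    · rw [if_pos hxy, if_pos hxy]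
      push_cast
      omega
    · rw [if_neg hxy, if_neg hxy]

theorem patLoop (rest : List Int) : ∀ (pairs : List (Int × Int)) (tails dpacc : List Int),
    patInv pairs tails → dpacc = pairs.map (·.2) →
    (rest.foldl (fun (st : List Int × List Int) x =>
      let d : Int := ((lms_bisect_right st.1 x : Nat) : Int) + 1
      let dp := st.2 ++ [d]
      let tails := if d - 1 < (st.1.length : Int) then PySem.List.pySetD st.1 (d - 1) x
                   else st.1 ++ [x]
      (tails, dp)) (tails, dpacc)).2
    = (rest.foldl lmsStep pairs).map (·.2) := by
  induction rest with
  | nil => intro pairs tails dpacc hinv hdp; simpa using hdp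
  | cons x t ih =>
    intro pairs tails dpacc hinv hdp
    simp only [List.foldl_cons]
    have hr : ((lms_bisect_right tails x : Nat) : Int) = lmsM pairs x := by
      simpa [lms_bisect_right] using hinv.2 x
    have hcond : (((lms_bisect_right tails x : Nat) : Int) + 1 - 1 < (tails.length : Int))
        ↔ PySem.List.bisectRight tails x < tails.length := by
      constructor <;> intro h
      · have : ((PySem.List.bisectRight tails x : Nat) : Int) < (tails.length : Int) := by
          simpa [lms_bisect_right] using h
        exact_mod_cast this
      · simp only [lms_bisect_right]
        omega
    have hset : PySem.List.pySetD tails (((lms_bisect_right tails x : Nat) : Int) + 1 - 1) x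
        = tails.set (PySem.List.bisectRight tails x) x := by
      have h1 : ((lms_bisect_right tails x : Nat) : Int) + 1 - 1
          = ((PySem.List.bisectRight tails x : Nat) : Int) := by simp [lms_bisect_right]
      rw [h1, PySem.List.pySetD_natCast]
    show (t.foldl _ (if ((lms_bisect_right tails x : Nat) : Int) + 1 - 1 < (tails.length : Int)
        then PySem.List.pySetD tails (((lms_bisect_right tails x : Nat) : Int) + 1 - 1) x
        else tails ++ [x],
        dpacc ++ [((lms_bisect_right tails x : Nat) : Int) + 1])).2 = _
    have htails : (if ((lms_bisect_right tails x : Nat) : Int) + 1 - 1 < (tails.length : Int)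
        then PySem.List.pySetD tails (((lms_bisect_right tails x : Nat) : Int) + 1 - 1) x
        else tails ++ [x])
        = (if PySem.List.bisectRight tails x < tails.length
           then tails.set (PySem.List.bisectRight tails x) x else tails ++ [x]) := by
      by_cases hc : PySem.List.bisectRight tails x < tails.length
      · rw [if_pos (hcond.mpr hc), if_pos hc, hset]
      · rw [if_neg (fun hh => hc (hcond.mp hh)), if_neg hc]
    rw [htails]
    apply ih (lmsStep pairs x) _ _ (patInv_step pairs tails x hinv)
    simp only [lmsStep, List.map_append, List.map_cons, List.map_nil, hdp, ← hr]
    simp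
    omega

theorem dpB_eq_lmsDp (vals : List Int) :
    (vals.foldl (fun (st : List Int × List Int) x =>
      let d : Int := ((lms_bisect_right st.1 x : Nat) : Int) + 1
      let dp := st.2 ++ [d]
      let tails := if d - 1 < (st.1.length : Int) then PySem.List.pySetD st.1 (d - 1) x
                   else st.1 ++ [x]
      (tails, dp)) ([], [])).2 = lmsDp vals := by
  have h0 : patInv [] [] := by
    constructor
    · exact List.Pairwise.nil
    · intro y; simp [lmsM]
  simpa [lmsPairs, lmsDp] using patLoop vals [] [] [] h0 rfl

-- ---- A-side: the nested loops compute the same canonical dp ----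

theorem pyGetD_mid (P R : List Int) (c : Int) :
    PySem.List.pyGetD (P ++ c :: R) (P.length : Int) 0 = c := by
  rw [PySem.List.pyGetD_natCast]
  simp [List.getD_eq_getElem?_getD]

theorem pySetD_mid (P R : List Int) (c v : Int) :
    PySem.List.pySetD (P ++ c :: R) (P.length : Int) v = P ++ v :: R := by
  rw [PySem.List.pySetD_natCast]
  simp

theorem pyGetD_pref (P R : List Int) (j : Int) (h0 : 0 ≤ j) (h : j < (P.length : Int)) :
    PySem.List.pyGetD (P ++ R) j 0 = PySem.List.pyGetD P j 0 := by
  have hj : j.toNat < P.length := by omega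
  rw [PySem.List.pyGetD_eq_getElem _ _ h0 (by simp; omega),
      PySem.List.pyGetD_eq_getElem _ _ h0 (by exact_mod_cast h)]
  exact List.getElem_append_left hj

-- the inner loop only ever rewrites the cell at index i = P.length, turning its value c
-- into a running maximum over the already-final prefix P
theorem inner_shape (vals P : List Int) (i : Int) (hi : i = (P.length : Int)) (x : Int)
    (hx : x = PySem.List.pyGetD vals i 0) :
    ∀ (js : List Int), (∀ j ∈ js, 0 ≤ j ∧ j < (P.length : Int)) → ∀ (R : List Int) (c : Int),
    js.foldl (fun dp j =>
      if PySem.List.pyGetD vals j 0 ≤ PySem.List.pyGetD vals i 0 ∧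
         PySem.List.pyGetD dp i 0 < PySem.List.pyGetD dp j 0 + 1 then
        PySem.List.pySetD dp i (PySem.List.pyGetD dp j 0 + 1)
      else dp) (P ++ c :: R)
    = P ++ (js.foldl (fun b j =>
        if PySem.List.pyGetD vals j 0 ≤ x ∧ b < PySem.List.pyGetD P j 0 + 1 then
          PySem.List.pyGetD P j 0 + 1 else b) c) :: R := by
  subst hi
  subst hx
  intro js
  induction js with
  | nil => intro _ R c; simp
  | cons j t ih =>
    intro hb R c
    obtain ⟨hj0, hjP⟩ := hb j (by simp)
    have hread : PySem.List.pyGetD (P ++ c :: R) j 0 = PySem.List.pyGetD P j 0 :=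
      pyGetD_pref P (c :: R) j hj0 hjP
    simp only [List.foldl_cons, hread, pyGetD_mid, pySetD_mid]
    by_cases hc : PySem.List.pyGetD vals j 0 ≤ PySem.List.pyGetD vals (P.length : Int) 0 ∧
        c < PySem.List.pyGetD P j 0 + 1
    · rw [if_pos hc, if_pos hc]
      exact ih (fun j hj => hb j (by simp [hj])) R _
    · rw [if_neg hc, if_neg hc]
      exact ih (fun j hj => hb j (by simp [hj])) R c

theorem shift_max (x : Int) (L : List (Int × Int)) : ∀ c : Int,
    L.foldl (fun b p => if p.1 ≤ x then max b (p.2 + 1) else b) (c + 1)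
    = 1 + L.foldl (fun b p => if p.1 ≤ x then max b p.2 else b) c := by
  induction L with
  | nil => intro c; simp; omega
  | cons p t ih =>
    intro c
    simp only [List.foldl_cons]
    by_cases hc : p.1 ≤ x
    · rw [if_pos hc, if_pos hc]
      have : max (c + 1) (p.2 + 1) = (max c p.2) + 1 := by omega
      rw [this, ih]
    · rw [if_neg hc, if_neg hc, ih]

theorem value_fold (vals : List Int) (t : Nat) (ht : t ≤ vals.length) (x : Int) :
    (PySem.List.pyRange 0 (t : Int)).foldl (fun b j =>
      if PySem.List.pyGetD vals j 0 ≤ x ∧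
         b < PySem.List.pyGetD (lmsDp (vals.take t)) j 0 + 1 then
        PySem.List.pyGetD (lmsDp (vals.take t)) j 0 + 1 else b) 1
    = 1 + lmsM (lmsPairs (vals.take t)) x := by
  set L := lmsPairs (vals.take t) with hL
  have hlen : L.length = t := by
    rw [hL, length_lmsPairs, List.length_take]; omega
  have hcongr : ∀ (b : Int), ∀ j ∈ PySem.List.pyRange 0 (t : Int),
      (if PySem.List.pyGetD vals j 0 ≤ x ∧
          b < PySem.List.pyGetD (lmsDp (vals.take t)) j 0 + 1 then
        PySem.List.pyGetD (lmsDp (vals.take t)) j 0 + 1 else b)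
      = (fun b (p : Int × Int) => if p.1 ≤ x then max b (p.2 + 1) else b) b
          (PySem.List.pyGetD L j (0, 0)) := by
    intro b j hj
    rw [PySem.List.mem_pyRange_one] at hj
    have hjt : j.toNat < t := by omega
    have hjL : j.toNat < L.length := by omega
    have h1 : PySem.List.pyGetD vals j 0 = (PySem.List.pyGetD L j (0, 0)).1 := by
      rw [PySem.List.pyGetD_eq_getElem vals _ hj.1 (by omega),
          PySem.List.pyGetD_eq_getElem L _ hj.1 (by omega)]
      rw [lmsPairs_getElem_fst (vals.take t) j.toNat (by rw [← hL]; exact hjL)]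
      exact (List.getElem_take).symm
    have h2 : PySem.List.pyGetD (lmsDp (vals.take t)) j 0 = (PySem.List.pyGetD L j (0, 0)).2 := by
      rw [PySem.List.pyGetD_eq_getElem (lmsDp (vals.take t)) _ hj.1
            (by simp [lmsDp, ← hL]; omega),
          PySem.List.pyGetD_eq_getElem L _ hj.1 (by omega)]
      simp [lmsDp, ← hL]
    rw [h1, h2]
    simp only
    by_cases hc : (PySem.List.pyGetD L j (0, 0)).1 ≤ x
    · by_cases hb : b < (PySem.List.pyGetD L j (0, 0)).2 + 1
      · rw [if_pos ⟨hc, hb⟩, if_pos hc]; omega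
      · rw [if_neg (fun hh => hb hh.2), if_pos hc]; omega
    · rw [if_neg (fun hh => hc hh.1), if_neg hc]
  rw [PySem.List.foldl_congr_mem _ _ _ _ (fun b j hj => hcongr b j hj)]
  have hbound : (t : Int) = (L.length : Int) := by omega
  rw [hbound]
  rw [PySem.List.foldl_pyRange_zero_pyGetD' L (0, 0)
      (fun b (p : Int × Int) => if p.1 ≤ x then max b (p.2 + 1) else b) 1]
  have := shift_max x L 0
  simpa [lmsM] using this

theorem lmsDp_take_succ (vals : List Int) (t : Nat) (ht : t < vals.length) :
    lmsDp (vals.take (t + 1))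
    = lmsDp (vals.take t) ++ [1 + lmsM (lmsPairs (vals.take t)) (vals[t]'ht)] := by
  have htake : vals.take (t + 1) = vals.take t ++ [vals[t]'ht] := by
    rw [List.take_add_one, List.getElem?_eq_getElem ht]
    rfl
  rw [htake]
  simp only [lmsDp, lmsPairs, List.foldl_append, List.foldl_cons, List.foldl_nil, lmsStep,
    List.map_append]
  simp

theorem A_outer (vals : List Int) : ∀ t : Nat, 1 ≤ t → t ≤ vals.length →
    (PySem.List.pyRange 1 (t : Int)).foldl (fun dp i =>
      (PySem.List.pyRange 0 i).foldl (fun dp j =>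
        if PySem.List.pyGetD vals j 0 ≤ PySem.List.pyGetD vals i 0 ∧
           PySem.List.pyGetD dp i 0 < PySem.List.pyGetD dp j 0 + 1 then
          PySem.List.pySetD dp i (PySem.List.pyGetD dp j 0 + 1)
        else dp) dp) (List.replicate vals.length (1 : Int))
    = lmsDp (vals.take t) ++ List.replicate (vals.length - t) 1 := by
  intro t
  induction t with
  | zero => omega
  | succ t ih =>
    intro _ hlen
    by_cases ht1 : t = 0
    · subst ht1
      -- t+1 = 1 : empty outer range
      have : ((1 : Nat) : Int) = 1 := by norm_num
      rw [this, PySem.List.pyRange_one_eq_nil (by omega)]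
      simp only [List.foldl_nil]
      -- lmsDp (take 1) = [1]
      obtain ⟨v, rest, hv⟩ : ∃ v rest, vals = v :: rest := by
        cases vals with
        | nil => simp at hlen
        | cons v rest => exact ⟨v, rest, rfl⟩
      subst hv
      simp [lmsDp, lmsPairs, lmsStep, lmsM, List.replicate_succ]
    · have ht : 1 ≤ t := by omega
      have htn : t < vals.length := by omega
      have hsplit : ((t + 1 : Nat) : Int) = (t : Int) + 1 := by push_cast; ring
      rw [hsplit, PySem.List.pyRange_one_succ_right (by exact_mod_cast ht), List.foldl_append,
          ih ht (le_of_lt htn)]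
      simp only [List.foldl_cons, List.foldl_nil]
      -- one outer step at i = t
      have hrep : List.replicate (vals.length - t) (1 : Int)
          = 1 :: List.replicate (vals.length - t - 1) 1 := by
        rw [← List.replicate_succ]
        congr 1
        omega
      set P := lmsDp (vals.take t) with hP
      have hPlen : (t : Int) = (P.length : Int) := by
        have : P.length = t := by
          rw [hP]
          simp only [lmsDp, List.length_map, length_lmsPairs, List.length_take]
          omega
        omega
      rw [hrep]
      rw [inner_shape vals P (t : Int) hPlen _ rfl (PySem.List.pyRange 0 (t : Int))
            (fun j hj => by rw [PySem.List.mem_pyRange_one] at hj; omega)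
            (List.replicate (vals.length - t - 1) 1) 1]
      have hx : PySem.List.pyGetD vals (t : Int) 0 = vals[t]'htn := by
        rw [PySem.List.pyGetD_eq_getElem vals _ (by omega) (by omega)]
        simp
      rw [hx, value_fold vals t (le_of_lt htn) (vals[t]'htn)]
      rw [lmsDp_take_succ vals t htn]
      have : vals.length - (t + 1) = vals.length - t - 1 := by omega
      rw [this, ← hP]
      simp

theorem pyGetD_neg_map (xs : List Int) (k : Int) :
    PySem.List.pyGetD (xs.map (fun y => -y)) k 0 = -(PySem.List.pyGetD xs k 0) := by
  simpa using PySem.List.pyGetD_map (fun y => -y) xs k 0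

theorem A_full (vals : List Int) :
    (PySem.List.pyRange 1 (vals.length : Int)).foldl (fun dp i =>
      (PySem.List.pyRange 0 i).foldl (fun dp j =>
        if PySem.List.pyGetD vals j 0 ≤ PySem.List.pyGetD vals i 0 ∧
           PySem.List.pyGetD dp i 0 < PySem.List.pyGetD dp j 0 + 1 then
          PySem.List.pySetD dp i (PySem.List.pyGetD dp j 0 + 1)
        else dp) dp) (List.replicate vals.length (1 : Int))
    = lmsDp vals := by
  cases vals with
  | nil => simp [lmsDp, lmsPairs]
  | cons v rest =>
    have h := A_outer (v :: rest) (v :: rest).length (by simp) le_rfl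
    simpa using h

theorem dpA_eq_lmsDp (sequence : List Int) (increasing : Bool) :
    ((PySem.List.pyRange 1 (sequence.length : Int)).foldl (fun dp i =>
      (PySem.List.pyRange 0 i).foldl (fun dp j =>
        if increasing then
          if PySem.List.pyGetD sequence i 0 ≥ PySem.List.pyGetD sequence j 0 ∧
             PySem.List.pyGetD dp i 0 < PySem.List.pyGetD dp j 0 + 1 then
            PySem.List.pySetD dp i (PySem.List.pyGetD dp j 0 + 1)
          else dp
        else
          if PySem.List.pyGetD sequence i 0 ≤ PySem.List.pyGetD sequence j 0 ∧
             PySem.List.pyGetD dp i 0 < PySem.List.pyGetD dp j 0 + 1 then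
            PySem.List.pySetD dp i (PySem.List.pyGetD dp j 0 + 1)
          else dp) dp) (List.replicate sequence.length (1 : Int)))
    = lmsDp (if increasing then sequence else sequence.map (fun y => -y)) := by
  cases increasing with
  | true =>
    simp only [if_true, ge_iff_le]
    exact A_full sequence
  | false =>
    simp only [Bool.false_eq_true, if_false]
    have hlen : (sequence.map (fun y => -y)).length = sequence.length := by simp
    have hcongr : ∀ (dp : List Int), ∀ i ∈ PySem.List.pyRange 1 (sequence.length : Int),
        (PySem.List.pyRange 0 i).foldl (fun dp j =>
          if PySem.List.pyGetD sequence i 0 ≤ PySem.List.pyGetD sequence j 0 ∧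
             PySem.List.pyGetD dp i 0 < PySem.List.pyGetD dp j 0 + 1 then
            PySem.List.pySetD dp i (PySem.List.pyGetD dp j 0 + 1)
          else dp) dp
        = (PySem.List.pyRange 0 i).foldl (fun dp j =>
          if PySem.List.pyGetD (sequence.map (fun y => -y)) j 0
               ≤ PySem.List.pyGetD (sequence.map (fun y => -y)) i 0 ∧
             PySem.List.pyGetD dp i 0 < PySem.List.pyGetD dp j 0 + 1 then
            PySem.List.pySetD dp i (PySem.List.pyGetD dp j 0 + 1)
          else dp) dp := by
      intro dp i _
      apply PySem.List.foldl_congr_mem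
      intro acc j _
      simp only [pyGetD_neg_map, neg_le_neg_iff]
    rw [PySem.List.foldl_congr_mem _ _ _ _ hcongr]
    rw [← hlen]
    exact A_full (sequence.map (fun y => -y))

-- ---- reconstruction: prepend-with-last-element-read vs append-then-reverse ----
theorem recon_eq (seqv dp : List Int) (increasing : Bool) (last : Int) :
    ∀ (idxs : List Int) (r : List Int) (m : Int), r.head? = some last →
    ((idxs.foldl (fun (st : List Int × Int) i =>
        if increasing then
          if PySem.List.pyGetD seqv i 0 ≤ PySem.List.pyGetD st.1 (-1) 0 ∧
             PySem.List.pyGetD dp i 0 = st.2 - 1 then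
            (PySem.List.pyGetD seqv i 0 :: st.1, st.2 - 1)
          else st
        else
          if PySem.List.pyGetD seqv i 0 ≥ PySem.List.pyGetD st.1 (-1) 0 ∧
             PySem.List.pyGetD dp i 0 = st.2 - 1 then
            (PySem.List.pyGetD seqv i 0 :: st.1, st.2 - 1)
          else st) (r.reverse, m)).1)
    = ((idxs.foldl (fun (st : List Int × Int) i =>
        if PySem.List.pyGetD dp i 0 = st.2 ∧
           (if increasing then PySem.List.pyGetD seqv i 0 ≤ last
            else PySem.List.pyGetD seqv i 0 ≥ last) then
          (st.1 ++ [PySem.List.pyGetD seqv i 0], st.2 - 1)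
        else st) (r, m - 1)).1).reverse := by
  intro idxs
  induction idxs with
  | nil => intro r m hh; simp
  | cons i t ih =>
    intro r m hh
    have hrne : r ≠ [] := by intro h; subst h; simp at hh
    have hrev : r.reverse ≠ [] := by simpa using hrne
    have hlast : PySem.List.pyGetD r.reverse (-1) 0 = last := by
      rw [PySem.List.pyGetD_neg_one r.reverse 0 hrev]
      rw [List.getLast_reverse]
      have := List.head?_eq_some_head hrne
      rw [hh] at this
      exact (Option.some_injective _ this).symm
    simp only [List.foldl_cons, hlast]
    set x := PySem.List.pyGetD seqv i 0 with hx
    set dv := PySem.List.pyGetD dp i 0 with hdv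
    have hh' : (r ++ [x]).head? = some last := by
      cases r with
      | nil => simp at hh
      | cons a t2 => simpa using hh
    cases increasing with
    | true =>
      simp only [if_true]
      by_cases hc : x ≤ last ∧ dv = m - 1
      · rw [if_pos hc, if_pos (by exact ⟨hc.2, hc.1⟩)]
        have : (x :: r.reverse, m - 1) = ((r ++ [x]).reverse, m - 1) := by simp
        rw [this]
        have := ih (r ++ [x]) (m - 1) hh'
        simpa using this
      · rw [if_neg hc, if_neg (fun hcc => hc ⟨hcc.2, hcc.1⟩)]
        exact ih r m hh
    | false =>
      simp only [Bool.false_eq_true, if_false]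
      by_cases hc : x ≥ last ∧ dv = m - 1
      · rw [if_pos hc, if_pos (by exact ⟨hc.2, hc.1⟩)]
        have : (x :: r.reverse, m - 1) = ((r ++ [x]).reverse, m - 1) := by simp
        rw [this]
        have := ih (r ++ [x]) (m - 1) hh'
        simpa using this
      · rw [if_neg hc, if_neg (fun hcc => hc ⟨hcc.2, hcc.1⟩)]
        exact ih r m hh

-- ===== VERDICT (by name: the statement is the Claim_ definition above) =====
theorem longest_monotonic_subsequence_spec : Claim_equal_longest_monotonic_subsequence := by
  intro sequence increasing _ _
  unfold Spec_longest_monotonic_subsequence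
  unfold longest_monotonic_subsequence longest_monotonic_subsequence_alt
  simp only
  rw [dpA_eq_lmsDp sequence increasing,
      dpB_eq_lmsDp (if increasing then sequence else sequence.map (fun y => -y))]
  set D := lmsDp (if increasing then sequence else sequence.map (fun y => -y)) with hD
  cases hM : PySem.List.max? D (fun y => y) with
  | none => rfl
  | some m =>
    simp only
    set k : Int := (((PySem.List.index? D m).getD 0 : Nat) : Int) with hk
    have := recon_eq sequence D increasing (PySem.List.pyGetD sequence k 0)
      (PySem.List.pyRange (k - 1) (-1) (-1)) [PySem.List.pyGetD sequence k 0] m (by simp)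
    simpa using this
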